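-- pv_equiv track=rewrite | github.com/weishi10141993/waffles | src/waffles/core/utils.py | __purge_parameters_dictionary
-- ===== SOURCE A (Python) =====
-- def __purge_parameters_dictionary(
--         input_: dict
-- ) -> dict:
--     """This helper function takes an input dictionary and
--     deletes from it any key-value pair for which its key
--     or value matches an empty string.
--
--     Parameters
--     ----------
--     input_: dict
--
--     Returns
--     ----------
--     dict
--     """
--
--     keys_to_delete = []
--     for key in input_.keys():
--         if key == '' or input_[key] == '':
--             keys_to_delete.append(key)
--
--     for key in keys_to_delete:
--         del input_[key]
--
--     return input_
-- ===== SOURCE B (Python) =====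
-- def __purge_parameters_dictionary(
--         input_: dict
-- ) -> dict:
--     """Fixpoint deletion: repeatedly search the dict for one offending
--     entry (empty key or empty value) and delete it, until none is left.
--     No auxiliary list of keys is built; mutation stays in place."""
--     while True:
--         bad = next((k for k, v in input_.items() if k == '' or v == ''), None)
--         if bad is None:
--             return input_
--         del input_[bad]
-- ===== Notes on version B (the rewrite author's own statement) =====
-- stated objective: alternative
-- what changed: A does two staged passes (collect the keys to delete into a list, then delete them all); B is a fixpoint loop that repeatedly searches for one offending entry and deletes it immediately, stopping when a full search finds none, building no auxiliary key list.
import Mathlib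
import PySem

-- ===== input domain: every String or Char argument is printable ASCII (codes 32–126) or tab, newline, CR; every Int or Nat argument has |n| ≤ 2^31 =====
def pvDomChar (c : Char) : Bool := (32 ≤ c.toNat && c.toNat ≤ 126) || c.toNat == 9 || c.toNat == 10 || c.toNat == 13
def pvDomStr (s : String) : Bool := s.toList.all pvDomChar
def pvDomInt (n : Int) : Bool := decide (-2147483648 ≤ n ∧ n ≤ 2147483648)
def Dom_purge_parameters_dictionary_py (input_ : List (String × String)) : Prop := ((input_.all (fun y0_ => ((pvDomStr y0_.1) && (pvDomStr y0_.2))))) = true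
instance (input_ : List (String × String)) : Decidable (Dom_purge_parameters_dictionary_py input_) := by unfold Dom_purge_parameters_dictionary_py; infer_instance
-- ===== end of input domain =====

-- B replaces A's two staged passes (collect keys to delete, then delete them) by a fixpoint
-- loop that repeatedly finds one offending entry and deletes it immediately (in Python both
-- mutate the argument in place; the equivalence proved here is about the returned key/value
-- sequence).


-- ===== PORT A =====
-- Python dict → association list; the dict on which A operates is PySem.Dict.mk input_.
def purge_parameters_dictionary_py (input_ : List (String × String)) : List (String × String) :=
  let d : PySem.Dict String String := PySem.Dict.mk input_
  let keys_to_delete : List String :=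
    d.keys.foldl (fun acc key => if key = "" ∨ d.getD key "" = "" then acc ++ [key] else acc) []
  (keys_to_delete.foldl (fun d key => d.erase key) d).items

-- ===== PORT B =====
-- Source B: while True: bad = first key with k == '' or v == '' (None if no such entry);
-- if bad is None return input_; del input_[bad].
def pvPurgeLoop (d : PySem.Dict String String) : PySem.Dict String String :=
  match h : d.items.find? (fun p => p.1 == "" || p.2 == "") with
  | none => d
  | some p => pvPurgeLoop (d.erase p.1)
termination_by d.items.length
decreasing_by
  have hpm : p ∈ d.items := List.mem_of_find?_eq_some h
  simp only [PySem.Dict.erase]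
  exact List.length_filter_lt_length_iff_exists.mpr ⟨p, hpm, by simp⟩

def purge_parameters_dictionary_py_alt (input_ : List (String × String)) : List (String × String) :=
  (pvPurgeLoop (PySem.Dict.mk input_)).items

-- ===== PRECONDITION & SPEC =====
-- Pre_ requires distinct keys: an association list with duplicate keys does not represent any
-- Python dict (dict keys are unique), so no behaviour of A is defined by such an input.
def Pre_purge_parameters_dictionary_py (input_ : List (String × String)) : Prop :=
  (input_.map Prod.fst).Nodup
instance (input_ : List (String × String)) : Decidable (Pre_purge_parameters_dictionary_py input_) := by
  unfold Pre_purge_parameters_dictionary_py; infer_instance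

def pvWitness_purge_parameters_dictionary_py : (List (String × String)) :=
  [("a", "1"), ("", "2"), ("b", ""), ("c", "3")]

def Spec_purge_parameters_dictionary_py (input_ : List (String × String)) (out : List (String × String)) : Prop := out = purge_parameters_dictionary_py_alt input_
instance (input_ : List (String × String)) (out : List (String × String)) : Decidable (Spec_purge_parameters_dictionary_py input_ out) := by unfold Spec_purge_parameters_dictionary_py; infer_instance

-- ===== CLAIM (what is proved, stated in full; the proofs are below) =====
def Claim_equal_purge_parameters_dictionary_py : Prop := ∀ (input_ : List (String × String)), Dom_purge_parameters_dictionary_py input_ → Pre_purge_parameters_dictionary_py input_ → Spec_purge_parameters_dictionary_py input_ (purge_parameters_dictionary_py input_)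

-- ===== LEMMAS AND PROOFS =====

-- The good (surviving) entries.
def pvGood (p : String × String) : Bool := p.1 ≠ "" && p.2 ≠ ""

-- A's first loop is a filtered copy of the key list.
lemma foldl_collect (q : String → Prop) [DecidablePred q] (l : List String) :
    l.foldl (fun acc key => if q key then acc ++ [key] else acc) []
      = l.filter (fun k => decide (q k)) := by
  have h := PySem.List.foldl_append_if (fun k => decide (q k)) id l []
  simpa using h

-- Folding Dict.erase over a list of keys filters out exactly the items whose key is in that list.
lemma items_foldl_erase (ks : List String) (d : PySem.Dict String String) :
    (ks.foldl (fun d key => d.erase key) d).items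
      = d.items.filter (fun p => decide (p.1 ∉ ks)) := by
  induction ks generalizing d with
  | nil => simp
  | cons k ks ih =>
      rw [List.foldl_cons, ih (d.erase k)]
      simp only [PySem.Dict.erase, List.filter_filter]
      apply List.filter_congr
      intro p _
      by_cases h1 : p.1 = k <;> simp [h1]

-- A returns exactly the good entries, in order.
lemma A_eq_filter (input_ : List (String × String))
    (hpre : (input_.map Prod.fst).Nodup) :
    purge_parameters_dictionary_py input_ = input_.filter pvGood := by
  unfold purge_parameters_dictionary_py
  simp only []
  have hkeys : (PySem.Dict.mk input_).keys = input_.map Prod.fst := rfl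
  have hnd : (PySem.Dict.mk input_).keys.Nodup := by rw [hkeys]; exact hpre
  rw [hkeys,
      foldl_collect (fun key => key = "" ∨ (PySem.Dict.mk input_).getD key "" = "")
        (input_.map Prod.fst),
      items_foldl_erase]
  show input_.filter _ = _
  apply List.filter_congr
  intro p hp
  have hget : (PySem.Dict.mk input_).getD p.1 "" = p.2 :=
    PySem.Dict.getD_of_mem_items _ hp hnd ""
  have hmem : p.1 ∈
      (List.filter (fun key => decide (key = "" ∨ (PySem.Dict.mk input_).getD key "" = ""))
        (input_.map Prod.fst)) ↔ (p.1 = "" ∨ p.2 = "") := by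
    constructor
    · intro h
      simp only [List.mem_filter, decide_eq_true_eq] at h
      rcases h.2 with h2 | h2
      · exact Or.inl h2
      · rw [← hget]; exact Or.inr h2
    · intro h
      simp only [List.mem_filter, decide_eq_true_eq]
      exact ⟨List.mem_map.mpr ⟨p, hp, rfl⟩, by rw [hget]; tauto⟩
  by_cases h1 : p.1 = "" <;> by_cases h2 : p.2 = "" <;>
    simp only [hmem] <;> simp [pvGood, h1, h2]

-- Erasing a key keeps the key sequence a subsequence.
lemma keys_erase_sublist (d : PySem.Dict String String) (k : String) :
    (d.erase k).keys.Sublist d.keys := by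
  simp only [PySem.Dict.erase, PySem.Dict.keys]
  exact List.filter_sublist.map _

-- B's fixpoint loop also returns exactly the good entries, in order (keys distinct).
lemma pvPurgeLoop_eq_filter (n : Nat) (d : PySem.Dict String String)
    (hlen : d.items.length ≤ n) (hnd : d.keys.Nodup) :
    (pvPurgeLoop d).items = d.items.filter pvGood := by
  induction n generalizing d with
  | zero =>
      have h0 : d.items = [] := List.eq_nil_of_length_eq_zero (Nat.le_zero.mp hlen)
      rw [pvPurgeLoop]
      split
      · simp [h0]
      · next p h => rw [h0] at h; simp at h
  | succ n ih =>
      rw [pvPurgeLoop]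
      split
      · next h =>
          have : ∀ p ∈ d.items, pvGood p = true := by
            intro p hp
            have := List.find?_eq_none.mp h p hp
            simp only [Bool.or_eq_true, beq_iff_eq, not_or] at this
            simp [pvGood, this.1, this.2]
          exact (List.filter_eq_self.mpr this).symm
      · next p h =>
          have hpm : p ∈ d.items := List.mem_of_find?_eq_some h
          have hpbad := List.find?_some h
          have hnd' : (d.erase p.1).keys.Nodup :=
            hnd.sublist (keys_erase_sublist d p.1)
          have hlen' : (d.erase p.1).items.length ≤ n := by
            have hlt : (d.erase p.1).items.length < d.items.length := by
              simp only [PySem.Dict.erase]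
              exact List.length_filter_lt_length_iff_exists.mpr ⟨p, hpm, by simp⟩
            omega
          rw [ih _ hlen' hnd']
          simp only [PySem.Dict.erase, List.filter_filter]
          apply List.filter_congr
          intro q hq
          by_cases hk : q.1 = p.1
          · have hqp : q = p := List.inj_on_of_nodup_map hnd hq hpm hk
            subst hqp
            have hg : pvGood q = false := by
              simp only [Bool.or_eq_true, beq_iff_eq] at hpbad
              rcases hpbad with h1 | h2
              · simp [pvGood, h1]
              · simp [pvGood, h2]
            simp [hg]
          · simp [hk]

-- ===== VERDICT (by name: the statement is the Claim_ definition above) =====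
theorem purge_parameters_dictionary_py_spec : Claim_equal_purge_parameters_dictionary_py := by
  intro input_ _ hpre
  unfold Spec_purge_parameters_dictionary_py purge_parameters_dictionary_py_alt
  rw [A_eq_filter input_ hpre,
      pvPurgeLoop_eq_filter (PySem.Dict.mk input_).items.length _ le_rfl hpre]
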